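-- pv_equiv track=rewrite | github.com/kayoung-dev/problem-solving | generator/level01/g077.py | get_all_solutions
-- ===== SOURCE A (Python) =====
-- from collections import deque
--
-- def get_all_solutions(stamp, target):
--     m, n = len(stamp), len(target)
--     goal = "?" * n
--     queue = deque([(target, [])])
--     visited = {target: 0}
--     min_dist = float('inf')
--     all_paths = []
--
--     while queue:
--         curr, path = queue.popleft()
--         if len(path) > min_dist: break
--
--         if curr == goal:
--             min_dist = len(path)
--             all_paths.append(" ".join(map(str, path[::-1])))
--             continue
--
--         for i in range(n - m + 1):
--             match, has_val = True, False
--             temp = list(curr)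
--             for j in range(m):
--                 if curr[i+j] == '?': continue
--                 if curr[i+j] == stamp[j]:
--                     has_val, temp[i+j] = True, '?'
--                 else:
--                     match = False
--                     break
--             if match and has_val:
--                 nxt = "".join(temp)
--                 if nxt not in visited or visited[nxt] == len(path) + 1:
--                     visited[nxt] = len(path) + 1
--                     queue.append((nxt, path + [i]))
--
--     if not all_paths: return ["FAILED"]
--     return sorted(list(set(all_paths)))
-- ===== SOURCE B (Python) =====
-- def get_all_solutions(stamp, target):
--     m, n = len(stamp), len(target)
--     goal = '?' * n
--
--     def apply(s, i):
--         temp = list(s)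
--         used = False
--         for j in range(m):
--             c = s[i + j]
--             if c == '?':
--                 continue
--             if c != stamp[j]:
--                 return None
--             used = True
--             temp[i + j] = '?'
--         return ''.join(temp) if used else None
--
--     def dfs(s, depth):
--         # returns (all goal-reaching sequences of exactly `depth` moves,
--         #          whether ANY sequence of `depth` moves exists from s)
--         if depth == 0:
--             return ([[]] if s == goal else [], True)
--         res, alive = [], False
--         for i in range(n - m + 1):
--             t = apply(s, i)
--             if t is not None:
--                 sub, sub_alive = dfs(t, depth - 1)
--                 alive = alive or sub_alive
--                 for rest in sub:
--                     res.append([i] + rest)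
--         return (res, alive)
--
--     bound = sum(1 for c in target if c != '?')
--     for d in range(bound + 1):
--         seqs, alive = dfs(target, d)
--         if seqs:
--             return sorted({' '.join(map(str, seq[::-1])) for seq in seqs})
--         if not alive:
--             break
--     return ["FAILED"]
-- ===== Notes on version B (the rewrite author's own statement) =====
-- stated objective: alternative
-- what changed: Replaces A's breadth-first search (deque of (state,path) pairs with a visited-distance dict and min_dist/break bookkeeping) by iterative deepening: a pure depth-bounded DFS with no queue, no visited set and no distance dict, re-run for depth d = 0,1,2,... up to the count of non-'?' characters (each stamp application erases at least one character, so no solution can be longer), stopping early when no sequence of the current depth exists at all; the first depth whose DFS reaches the all-'?' goal yields exactly all minimal sequences, which are deduplicated and sorted as in A.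
import Mathlib
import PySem

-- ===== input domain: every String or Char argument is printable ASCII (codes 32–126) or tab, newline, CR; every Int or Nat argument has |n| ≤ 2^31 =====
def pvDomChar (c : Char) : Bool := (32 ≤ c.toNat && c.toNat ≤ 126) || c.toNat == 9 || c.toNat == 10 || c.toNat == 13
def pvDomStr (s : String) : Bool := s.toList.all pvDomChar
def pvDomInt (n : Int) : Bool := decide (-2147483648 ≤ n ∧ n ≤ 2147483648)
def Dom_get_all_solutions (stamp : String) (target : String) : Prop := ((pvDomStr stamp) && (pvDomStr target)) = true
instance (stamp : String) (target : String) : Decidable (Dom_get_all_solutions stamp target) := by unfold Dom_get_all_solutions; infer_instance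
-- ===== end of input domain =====

-- B replaces A's breadth-first search (deque of (state, path) pairs, visited-distance dict,
-- min_dist/break bookkeeping) by iterative deepening: depth-bounded DFS with no queue and no
-- visited structure, re-run for d = 0,1,2,… up to the count of non-'?' characters; same
-- return value, no speed claim (objective: alternative).

-- ===== PORT A =====
-- proof-side measure used by the ports' termination arguments: number of not-yet-stamped chars
def pvCnt (s : List Char) : Nat := s.countP (fun c => c != '?')

-- ' '.join(map(str, p)) — both Pythons format an index list this way.
def pvRender (p : List Nat) : String :=
  PySem.Str.join " " (p.map (fun i => PySem.Int.toStr (i : Int)))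

-- A's inner window loop 'for j in range(m): …' (state: has_val, temp; match via first component).
-- All indices i+j (into curr/temp) and j (into stamp) are in range at every call site
-- (i < n+1-m, j < m, curr.length = n), so List.getD / List.set are exact for Python's
-- curr[i+j], stamp[j] and temp[i+j] = '?'.
def pvScan (stamp curr : List Char) (i : Nat) : List Nat → Bool → List Char → Bool × Bool × List Char
  | [], hasVal, temp => (true, hasVal, temp)
  | j :: js, hasVal, temp =>
    let c := curr.getD (i + j) ' '
    if c = '?' then pvScan stamp curr i js hasVal temp
    else if c = stamp.getD j ' ' then pvScan stamp curr i js true (temp.set (i + j) '?')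
    else (false, hasVal, temp)

-- facts about pvScan needed by the ports' termination arguments
lemma pvCnt_set_lt (l : List Char) (p : Nat) (hp : p < l.length)
    (hc : l.getD p ' ' ≠ '?') : pvCnt (l.set p '?') < pvCnt l := by
  induction l generalizing p with
  | nil => simp at hp
  | cons a tl ih =>
    cases p with
    | zero =>
      simp only [List.getD_cons_zero] at hc
      rw [show (a :: tl).set 0 '?' = '?' :: tl from rfl]
      simp [pvCnt, List.countP_cons, hc]
    | succ q =>
      simp only [List.length_cons, Nat.succ_lt_succ_iff] at hp
      simp only [List.getD_cons_succ] at hc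
      have := ih q hp hc
      rw [show (a :: tl).set (q+1) '?' = a :: tl.set q '?' from rfl]
      simp only [pvCnt, List.countP_cons] at *
      omega

lemma pvScan_main (stamp curr : List Char) (i : Nat) :
    ∀ (js : List Nat) (hv : Bool) (temp : List Char),
      temp.length = curr.length →
      (∀ j ∈ js, temp.getD (i + j) ' ' = curr.getD (i + j) ' ') →
      js.Nodup →
      (∀ j ∈ js, i + j < curr.length) →
      pvCnt temp ≤ pvCnt curr →
      (hv = true → pvCnt temp < pvCnt curr) →
      (pvScan stamp curr i js hv temp).2.2.length = curr.length ∧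
      ((pvScan stamp curr i js hv temp).1 = true →
        (pvScan stamp curr i js hv temp).2.1 = true →
        pvCnt (pvScan stamp curr i js hv temp).2.2 < pvCnt curr) := by
  intro js
  induction js with
  | nil =>
    intro hv temp h1 _ _ _ h5 h6
    exact ⟨h1, fun _ hhv => h6 hhv⟩
  | cons j js ih =>
    intro hv temp h1 h2 h3 h4 h5 h6
    rw [pvScan]
    by_cases hc1 : curr.getD (i + j) ' ' = '?'
    · rw [if_pos hc1]
      exact ih hv temp h1 (fun p hp => h2 p (List.mem_cons_of_mem _ hp))
        (List.Nodup.of_cons h3) (fun p hp => h4 p (List.mem_cons_of_mem _ hp)) h5 h6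
    · rw [if_neg hc1]
      by_cases hc2 : curr.getD (i + j) ' ' = stamp.getD j ' '
      · rw [if_pos hc2]
        have hjlen : i + j < curr.length := h4 j List.mem_cons_self
        have ht : temp.getD (i + j) ' ' = curr.getD (i + j) ' ' := h2 j List.mem_cons_self
        have hlt : pvCnt (temp.set (i + j) '?') < pvCnt temp :=
          pvCnt_set_lt temp (i + j) (by rw [h1]; exact hjlen) (by rw [ht]; exact hc1)
        refine ih true (temp.set (i + j) '?') (by simp [h1]) ?_
          (List.Nodup.of_cons h3) (fun p hp => h4 p (List.mem_cons_of_mem _ hp))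
          (by omega) (fun _ => by omega)
        intro p hp
        have hne : j ≠ p := by
          intro he; subst he
          exact (List.nodup_cons.1 h3).1 hp
        simp only [List.getD_eq_getElem?_getD]
        rw [List.getElem?_set_ne (by omega : i + j ≠ i + p)]
        have := h2 p (List.mem_cons_of_mem _ hp)
        simpa [List.getD_eq_getElem?_getD] using this
      · rw [if_neg hc2]
        exact ⟨h1, by intro h; simp at h⟩

lemma pvScan_child (stamp curr : List Char) (i m : Nat) (him : i + m ≤ curr.length) :
    (pvScan stamp curr i (List.range m) false curr).2.2.length = curr.length ∧
    ((pvScan stamp curr i (List.range m) false curr).1 = true →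
      (pvScan stamp curr i (List.range m) false curr).2.1 = true →
      pvCnt (pvScan stamp curr i (List.range m) false curr).2.2 < pvCnt curr) :=
  pvScan_main stamp curr i (List.range m) false curr rfl (fun _ _ => rfl)
    (List.nodup_range) (fun j hj => by have := List.mem_range.1 hj; omega)
    le_rfl (by simp)

-- termination measure for A's while-loop
def pvMu (n : Nat) (q : List (List Char × List Nat)) : Nat :=
  (q.map (fun sp => (n+2) ^ pvCnt sp.1)).sum

lemma pvMu_cons (n : Nat) (e : List Char × List Nat) (q : List (List Char × List Nat)) :
    pvMu n (e :: q) = (n+2) ^ pvCnt e.1 + pvMu n q := rfl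

lemma pvMu_append (n : Nat) (a b : List (List Char × List Nat)) :
    pvMu n (a ++ b) = pvMu n a + pvMu n b := by
  simp [pvMu]

lemma pvMu_le_mul (n d : Nat) :
    ∀ (E : List (List Char × List Nat)), (∀ e ∈ E, pvCnt e.1 ≤ d) →
      pvMu n E ≤ E.length * (n+2) ^ d := by
  intro E
  induction E with
  | nil => simp [pvMu]
  | cons e E ih =>
    intro h
    rw [pvMu_cons]
    have h1 : (n+2) ^ pvCnt e.1 ≤ (n+2) ^ d :=
      Nat.pow_le_pow_right (by omega) (h e (List.mem_cons_self))
    have h2 := ih (fun x hx => h x (List.mem_cons_of_mem _ hx))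
    simp only [List.length_cons]
    calc (n+2) ^ pvCnt e.1 + pvMu n E ≤ (n+2) ^ d + E.length * (n+2) ^ d := by omega
    _ = (E.length + 1) * (n+2) ^ d := by ring

lemma pvMuE_lt (n c : Nat) (E : List (List Char × List Nat))
    (h1 : ∀ e ∈ E, pvCnt e.1 < c) (h2 : E.length ≤ n + 1) :
    pvMu n E < (n+2) ^ c := by
  cases E with
  | nil =>
    have : 0 < (n+2) ^ c := Nat.pow_pos (by omega)
    simpa [pvMu] using this
  | cons e E =>
    have hc : 1 ≤ c := by have := h1 e List.mem_cons_self; omega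
    have hle : pvMu n (e :: E) ≤ (e :: E).length * (n+2) ^ (c-1) :=
      pvMu_le_mul n (c-1) _ (fun x hx => by have := h1 x hx; omega)
    calc pvMu n (e :: E) ≤ (n+1) * (n+2) ^ (c-1) :=
          le_trans hle (Nat.mul_le_mul_right _ h2)
    _ < (n+2) * (n+2) ^ (c-1) := by
          have : 0 < (n+2) ^ (c-1) := Nat.pow_pos (by omega)
          exact Nat.mul_lt_mul_of_lt_of_le (by omega) le_rfl this
    _ = (n+2) ^ (c-1+1) := (pow_succ' _ _).symm
    _ = (n+2) ^ c := by rw [Nat.sub_add_cancel hc]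

-- the body of A's inner 'for i in range(n - m + 1)' loop (appends to the deque, updates visited)
def pvBodyA (curr stamp : List Char) (m : Nat) (path : List Nat)
    (qv : List (List Char × List Nat) × PySem.Dict (List Char) Nat) (i : Nat) :
    List (List Char × List Nat) × PySem.Dict (List Char) Nat :=
  let r := pvScan stamp curr i (List.range m) false curr
  if r.1 && r.2.1 then
    if !(qv.2.contains r.2.2) || (qv.2.getD r.2.2 0 == path.length + 1) then
      (qv.1 ++ [(r.2.2, path ++ [i])], qv.2.insert r.2.2 (path.length + 1))
    else qv
  else qv

lemma pvBodyA_apply (curr stamp : List Char) (m : Nat) (path : List Nat)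
    (qv : List (List Char × List Nat) × PySem.Dict (List Char) Nat) (i : Nat) :
    pvBodyA curr stamp m path qv i =
      if ((pvScan stamp curr i (List.range m) false curr).1 && (pvScan stamp curr i (List.range m) false curr).2.1) then
        (if (!(qv.2.contains (pvScan stamp curr i (List.range m) false curr).2.2)
            || (qv.2.getD (pvScan stamp curr i (List.range m) false curr).2.2 0 == path.length + 1)) then
          (qv.1 ++ [((pvScan stamp curr i (List.range m) false curr).2.2, path ++ [i])],
            qv.2.insert (pvScan stamp curr i (List.range m) false curr).2.2 (path.length + 1))
        else qv)
      else qv := rfl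

lemma pvFoldA_shape (curr stamp : List Char) (m : Nat) (path : List Nat) :
    ∀ (L : List Nat), (∀ i ∈ L, i + m ≤ curr.length) →
    ∀ (q0 : List (List Char × List Nat)) (v : PySem.Dict (List Char) Nat),
    ∃ E, (L.foldl (pvBodyA curr stamp m path) (q0, v)).1 = q0 ++ E ∧
      E.length ≤ L.length ∧
      (∀ e ∈ E, e.1.length = curr.length ∧ pvCnt e.1 < pvCnt curr ∧ e.2.length = path.length + 1) := by
  intro L
  induction L with
  | nil => intro _ q0 v; exact ⟨[], by simp, by simp, by simp⟩
  | cons i L ih =>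
    intro hL q0 v
    have hhead := pvScan_child stamp curr i m (hL i List.mem_cons_self)
    rw [List.foldl_cons, pvBodyA_apply]
    split
    · split
      · obtain ⟨E, he1, he2, he3⟩ := ih (fun x hx => hL x (List.mem_cons_of_mem _ hx))
          (q0 ++ [((pvScan stamp curr i (List.range m) false curr).2.2, path ++ [i])])
          (v.insert (pvScan stamp curr i (List.range m) false curr).2.2 (path.length + 1))
        refine ⟨((pvScan stamp curr i (List.range m) false curr).2.2, path ++ [i]) :: E, ?_, ?_, ?_⟩
        · simpa [List.append_assoc] using he1
        · simp only [List.length_cons]; omega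
        · intro e he
          rcases List.mem_cons.1 he with rfl | he
          · rename_i hflags _
            rw [Bool.and_eq_true] at hflags
            exact ⟨hhead.1, hhead.2 hflags.1 hflags.2, by simp⟩
          · exact he3 e he
      · obtain ⟨E, he1, he2, he3⟩ := ih (fun x hx => hL x (List.mem_cons_of_mem _ hx)) q0 v
        exact ⟨E, he1, by simpa using Nat.le_succ_of_le he2, he3⟩
    · obtain ⟨E, he1, he2, he3⟩ := ih (fun x hx => hL x (List.mem_cons_of_mem _ hx)) q0 v
      exact ⟨E, he1, by simpa using Nat.le_succ_of_le he2, he3⟩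

lemma pvMuA_lt (n : Nat) (rest E : List (List Char × List Nat)) (curr : List Char) (path : List Nat)
    (h1 : ∀ e ∈ E, pvCnt e.1 < pvCnt curr) (h2 : E.length ≤ n + 1) :
    pvMu n (rest ++ E) < pvMu n ((curr, path) :: rest) := by
  rw [pvMu_append, pvMu_cons]
  have := pvMuE_lt n (pvCnt curr) E h1 h2
  show pvMu n rest + pvMu n E < (n+2) ^ pvCnt curr + pvMu n rest
  omega

lemma pvLoopA_hq_exp (stamp curr : List Char) (m n : Nat) (path : List Nat)
    (rest : List (List Char × List Nat)) (visited : PySem.Dict (List Char) Nat)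
    (hq : ∀ sp ∈ (curr, path) :: rest, sp.1.length = n) :
    ∀ sp ∈ ((List.range (n + 1 - m)).foldl (pvBodyA curr stamp m path) (rest, visited)).1,
      sp.1.length = n := by
  have hcur : curr.length = n := hq (curr, path) List.mem_cons_self
  obtain ⟨E, hE1, _, hE3⟩ := pvFoldA_shape curr stamp m path (List.range (n + 1 - m))
    (by intro i hi; rw [hcur]; have := List.mem_range.1 hi; omega) rest visited
  intro sp hsp
  rw [hE1] at hsp
  rcases List.mem_append.1 hsp with h | h
  · exact hq sp (List.mem_cons_of_mem _ h)
  · rw [(hE3 sp h).1, hcur]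

lemma pvLoopA_dec_goal (n : Nat) (curr : List Char) (path : List Nat)
    (rest : List (List Char × List Nat)) :
    pvMu n rest < pvMu n ((curr, path) :: rest) := by
  rw [pvMu_cons]
  have : 0 < (n+2) ^ pvCnt (curr, path).1 := Nat.pow_pos (by omega)
  omega

lemma pvLoopA_dec_exp (stamp curr : List Char) (m n : Nat) (path : List Nat)
    (rest : List (List Char × List Nat)) (visited : PySem.Dict (List Char) Nat)
    (hcur : curr.length = n) :
    pvMu n ((List.range (n + 1 - m)).foldl (pvBodyA curr stamp m path) (rest, visited)).1
      < pvMu n ((curr, path) :: rest) := by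
  obtain ⟨E, hE1, hE2, hE3⟩ := pvFoldA_shape curr stamp m path (List.range (n + 1 - m))
    (by intro i hi; rw [hcur]; have := List.mem_range.1 hi; omega) rest visited
  rw [hE1]
  exact pvMuA_lt n rest E curr path (fun e he => (hE3 e he).2.1)
    (by have := hE2; simp [List.length_range] at this; omega)

-- 'len(path) > min_dist' (min_dist starts as float('inf') = none)
def pvGtA (len : Nat) : Option Nat → Bool
  | none => false
  | some d => decide (d < len)

-- the BFS while-loop of A.  The hypothesis hq (every queued state has the target's length) is
-- an invariant of the real computation, carried only to justify termination.
def pvLoopA (stamp : List Char) (m n : Nat) (goal : List Char)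
    (queue : List (List Char × List Nat)) (visited : PySem.Dict (List Char) Nat)
    (minDist : Option Nat) (allPaths : List String)
    (hq : ∀ sp ∈ queue, sp.1.length = n) : List String :=
  match queue, hq with
  | [], _ => allPaths
  | (curr, path) :: rest, hq =>
    if pvGtA path.length minDist then allPaths
    else if curr = goal then
      pvLoopA stamp m n goal rest visited (some path.length)
        (allPaths ++ [pvRender path.reverse])
        (fun sp h => hq sp (List.mem_cons_of_mem _ h))
    else
      let st := (List.range (n + 1 - m)).foldl (pvBodyA curr stamp m path) (rest, visited)
      pvLoopA stamp m n goal st.1 st.2 minDist allPaths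
        (pvLoopA_hq_exp stamp curr m n path rest visited hq)
termination_by pvMu n queue
decreasing_by
  · exact pvLoopA_dec_goal n curr path rest
  · exact pvLoopA_dec_exp stamp curr m n path rest visited
      (hq (curr, path) List.mem_cons_self)

def get_all_solutions (stamp : String) (target : String) : List String :=
  let stampL := stamp.toList
  let targetL := target.toList
  let m := stampL.length
  let n := targetL.length
  let goal := List.replicate n '?'
  let allPaths := pvLoopA stampL m n goal [(targetL, [])]
    (PySem.Dict.ofList [(targetL, 0)]) none []
    (by intro sp h; simp only [List.mem_singleton] at h; subst h; rfl)
  if allPaths = [] then ["FAILED"]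
  else PySem.List.sorted (PySem.Set.ofList allPaths) (fun x => x) false

-- ===== PORT B =====
-- apply(s, i): erase one matching stamp window, or None.  Indices i+j / j in range at every
-- call site (i < n+1-m, j < m, s.length = n), so getD / set are exact for Python's s[i+j],
-- stamp[j], temp[i+j] = '?'.
def pvApplyGo (stamp s : List Char) (i : Nat) : List Nat → Bool → List Char → Option (List Char)
  | [], used, temp => if used then some temp else none
  | j :: js, used, temp =>
    let c := s.getD (i + j) ' '
    if c = '?' then pvApplyGo stamp s i js used temp
    else if c ≠ stamp.getD j ' ' then none
    else pvApplyGo stamp s i js true (temp.set (i + j) '?')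

def pvApply (stamp s : List Char) (i m : Nat) : Option (List Char) :=
  pvApplyGo stamp s i (List.range m) false s

-- dfs(s, depth): (all index sequences of exactly `depth` moves turning s into goal,
--                  whether ANY sequence of `depth` moves exists from s)
def pvDfs (stamp goal : List Char) (m n : Nat) : Nat → List Char → List (List Nat) × Bool
  | 0, s => (if s = goal then [[]] else [], true)
  | d+1, s =>
    (List.range (n + 1 - m)).foldl (fun ra i =>
      match pvApply stamp s i m with
      | none => ra
      | some t =>
        (ra.1 ++ ((pvDfs stamp goal m n d t).1.map (fun rest => i :: rest)),
          ra.2 || (pvDfs stamp goal m n d t).2)) ([], false)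

-- 'for d in range(bound + 1): …  if not alive: break' — iterative deepening over the depths
def pvIterGo (stamp target goal : List Char) (m n : Nat) : List Nat → List String
  | [] => ["FAILED"]
  | d :: ds =>
    let r := pvDfs stamp goal m n d target
    if r.1 ≠ [] then
      PySem.List.sorted
        (PySem.Set.ofList (r.1.map (fun seq => pvRender seq.reverse))) (fun x => x) false
    else if r.2 = false then ["FAILED"]
    else pvIterGo stamp target goal m n ds

def get_all_solutions_alt (stamp : String) (target : String) : List String :=
  let stampL := stamp.toList
  let targetL := target.toList
  let m := stampL.length
  let n := targetL.length
  let goal := List.replicate n '?'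
  let bound := targetL.countP (fun c => c != '?')
  pvIterGo stampL targetL goal m n (List.range (bound + 1))

-- ===== PRECONDITION & SPEC =====
def Spec_get_all_solutions (stamp : String) (target : String) (out : List String) : Prop := out = get_all_solutions_alt stamp target
instance (stamp : String) (target : String) (out : List String) : Decidable (Spec_get_all_solutions stamp target out) := by unfold Spec_get_all_solutions; infer_instance

-- ===== CLAIM (what is proved, stated in full; the proofs are below) =====
def Claim_equal_get_all_solutions : Prop := ∀ (stamp : String) (target : String), Dom_get_all_solutions stamp target → Spec_get_all_solutions stamp target (get_all_solutions stamp target)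

-- ===== LEMMAS AND PROOFS =====

-- proof-side closed form of A's matching moves of one state (scan-based)
def pvMoves (stamp s : List Char) (m n : Nat) : List (Nat × List Char) :=
  ((List.range (n + 1 - m)).filter (fun i =>
      (pvScan stamp s i (List.range m) false s).1 && (pvScan stamp s i (List.range m) false s).2.1)).map
    (fun i => (i, (pvScan stamp s i (List.range m) false s).2.2))

lemma pvMoves_mem (stamp s : List Char) (m n : Nat) (hs : s.length = n) :
    ∀ it ∈ pvMoves stamp s m n, it.2.length = n ∧ pvCnt it.2 < pvCnt s := by
  intro it hit
  obtain ⟨i, hi, rfl⟩ := List.mem_map.1 hit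
  obtain ⟨hirange, hflags⟩ := List.mem_filter.1 hi
  rw [Bool.and_eq_true] at hflags
  have him : i + m ≤ s.length := by
    have := List.mem_range.1 hirange; omega
  have := pvScan_child stamp s i m him
  exact ⟨by rw [this.1, hs], this.2 hflags.1 hflags.2⟩

lemma pvMoves_len (stamp s : List Char) (m n : Nat) :
    (pvMoves stamp s m n).length ≤ n + 1 := by
  calc _ = ((List.range (n + 1 - m)).filter _).length := List.length_map ..
  _ ≤ (List.range (n + 1 - m)).length := List.length_filter_le _ _
  _ ≤ n + 1 := by simp

-- closed form of A's kept expansion of one entry (s, p) given the already-seen states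
def pvKeptA (stamp : List Char) (m n : Nat) (seen : PySem.Set (List Char))
    (sp : List Char × List Nat) : List (List Char × List Nat) :=
  ((pvMoves stamp sp.1 m n).filter (fun it => !(PySem.Set.contains seen it.2))).map
    (fun it => (it.2, sp.2 ++ [it.1]))

lemma pvKeptA_facts (stamp : List Char) (m n : Nat) (seen : PySem.Set (List Char))
    (sp : List Char × List Nat) (hs : sp.1.length = n) :
    ∀ e ∈ pvKeptA stamp m n seen sp,
      e.1.length = n ∧ pvCnt e.1 < pvCnt sp.1 ∧ e.2.length = sp.2.length + 1 := by
  intro e he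
  simp only [pvKeptA, List.mem_map, List.mem_filter] at he
  obtain ⟨it, ⟨hit, _⟩, rfl⟩ := he
  have := pvMoves_mem stamp sp.1 m n hs it hit
  exact ⟨this.1, this.2, by simp⟩

lemma pvMuB_le (n : Nat) (kids : List Char × List Nat → List (List Char × List Nat)) :
    ∀ (Lf : List (List Char × List Nat)),
      (∀ sp ∈ Lf, pvMu n (kids sp) < (n+2) ^ pvCnt sp.1) →
      pvMu n (Lf.flatMap kids) ≤ pvMu n Lf := by
  intro Lf
  induction Lf with
  | nil => simp [pvMu]
  | cons e Lf ih =>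
    intro h
    rw [List.flatMap_cons, pvMu_append, pvMu_cons]
    have h1 := h e List.mem_cons_self
    have h2 := ih (fun x hx => h x (List.mem_cons_of_mem _ hx))
    omega

lemma pvMuB_lt (n : Nat) (kids : List Char × List Nat → List (List Char × List Nat))
    (Lf : List (List Char × List Nat)) (hne : Lf ≠ [])
    (h : ∀ sp ∈ Lf, pvMu n (kids sp) < (n+2) ^ pvCnt sp.1) :
    pvMu n (Lf.flatMap kids) < pvMu n Lf := by
  cases Lf with
  | nil => exact absurd rfl hne
  | cons e Lf =>
    rw [List.flatMap_cons, pvMu_append, pvMu_cons]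
    have h1 := h e List.mem_cons_self
    have h2 := pvMuB_le n kids Lf (fun x hx => h x (List.mem_cons_of_mem _ hx))
    omega

lemma pvKeptA_mu (stamp : List Char) (m n : Nat) (seen : PySem.Set (List Char))
    (sp : List Char × List Nat) (hs : sp.1.length = n) :
    pvMu n (pvKeptA stamp m n seen sp) < (n+2) ^ pvCnt sp.1 := by
  apply pvMuE_lt
  · intro e he
    exact (pvKeptA_facts stamp m n seen sp hs e he).2.1
  · calc (pvKeptA stamp m n seen sp).length
        ≤ (pvMoves stamp sp.1 m n).length := by
          simp only [pvKeptA, List.length_map]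
          exact List.length_filter_le _ _
    _ ≤ n + 1 := pvMoves_len stamp sp.1 m n

-- proof-side level-synchronous reformulation of A's BFS; hq carried for termination only
def pvLevels (stamp : List Char) (m n : Nat) (goal : List Char)
    (frontier : List (List Char × List Nat)) (seen : PySem.Set (List Char))
    (hq : ∀ sp ∈ frontier, sp.1.length = n) : List String :=
  if hne : frontier = [] then ["FAILED"]
  else
    let hits := (frontier.filter (fun sp => sp.1 == goal)).map (fun sp => pvRender sp.2.reverse)
    if hits ≠ [] then PySem.List.sorted (PySem.Set.ofList hits) (fun x => x) false
    else
      let nxt := frontier.flatMap (pvKeptA stamp m n seen)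
      pvLevels stamp m n goal nxt
        (PySem.Set.union seen (PySem.Set.ofList (nxt.map (fun sp => sp.1))))
        (by
          intro sp hsp
          obtain ⟨p, hp, hmem⟩ := List.mem_flatMap.1 hsp
          exact (pvKeptA_facts stamp m n seen p (hq p hp) sp hmem).1)
termination_by pvMu n frontier
decreasing_by
  exact pvMuB_lt n _ frontier hne
    (fun sp hsp => pvKeptA_mu stamp m n seen sp (hq sp hsp))

-- A-side entries carry forward paths; mid-layer relation between A's visited dict and the
-- already-seen set while discovering layer D: news = states discovered at distance D so far.
def pvInvMid (v : PySem.Dict (List Char) Nat) (seen : PySem.Set (List Char))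
    (news : List (List Char)) (D : Nat) : Prop :=
  (∀ t ∈ news, v.get? t = some D ∧ t ∉ seen) ∧
  (∀ t ∈ seen, ∃ d, v.get? t = some d ∧ d < D) ∧
  (∀ t : List Char, v.contains t = true → t ∈ seen ∨ t ∈ news)

lemma pvAccept_iff (v : PySem.Dict (List Char) Nat) (seen : PySem.Set (List Char))
    (news : List (List Char)) (D : Nat) (h : pvInvMid v seen news D) (t : List Char) :
    ((!(v.contains t)) || (v.getD t 0 == D)) = (!(PySem.Set.contains seen t)) := by
  obtain ⟨h1, h2, h3⟩ := h
  by_cases hs : t ∈ seen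
  · obtain ⟨d, hd, hdD⟩ := h2 t hs
    have hc : v.contains t = true := by
      rw [PySem.Dict.contains_eq_isSome_get?, hd]; rfl
    have hg : v.getD t 0 = d := PySem.Dict.getD_of_get?_eq_some _ _ hd
    have hsc : PySem.Set.contains seen t = true := (PySem.Set.contains_iff _ _).2 hs
    rw [hc, hsc, hg]
    simp [beq_iff_eq]
    omega
  · have hsc : PySem.Set.contains seen t = false := by
      by_contra hcon
      exact hs ((PySem.Set.contains_iff _ _).1 (by revert hcon; cases PySem.Set.contains seen t <;> simp))
    rw [hsc]
    by_cases hc : v.contains t = true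
    · rcases h3 t hc with h | h
      · exact absurd h hs
      · have := (h1 t h).1
        have hg : v.getD t 0 = D := PySem.Dict.getD_of_get?_eq_some _ _ this
        simp [hc, hg]
    · simp [Bool.of_not_eq_true hc]

lemma pvInvMid_insert (v : PySem.Dict (List Char) Nat) (seen : PySem.Set (List Char))
    (news : List (List Char)) (D : Nat) (t : List Char)
    (h : pvInvMid v seen news D) (ht : t ∉ seen) :
    pvInvMid (v.insert t D) seen (news ++ [t]) D := by
  obtain ⟨h1, h2, h3⟩ := h
  refine ⟨?_, ?_, ?_⟩
  · intro u hu
    rcases List.mem_append.1 hu with hu | hu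
    · rcases (h1 u hu) with ⟨hg, hns⟩
      by_cases he : u = t
      · subst he; exact ⟨PySem.Dict.get?_insert_self _ _ _, hns⟩
      · rw [PySem.Dict.get?_insert_of_ne _ _ he]; exact ⟨hg, hns⟩
    · rw [List.mem_singleton] at hu; subst hu
      exact ⟨PySem.Dict.get?_insert_self _ _ _, ht⟩
  · intro u hu
    obtain ⟨d, hd, hdD⟩ := h2 u hu
    have hne : u ≠ t := fun he => ht (he ▸ hu)
    exact ⟨d, by rw [PySem.Dict.get?_insert_of_ne _ _ hne]; exact hd, hdD⟩
  · intro u hu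
    by_cases he : u = t
    · subst he
      exact Or.inr (List.mem_append.2 (Or.inr (List.mem_singleton.2 rfl)))
    · rw [PySem.Dict.contains_insert _ t u D] at hu
      simp only [Bool.or_eq_true, beq_iff_eq] at hu
      rcases hu with h | h
      · exact absurd h he
      · rcases h3 u h with h | h
        · exact Or.inl h
        · exact Or.inr (List.mem_append.2 (Or.inl h))

-- the moves of curr that pass the seen-check, restricted to the index list L
def pvKeptOn (stamp curr : List Char) (m : Nat) (seen : PySem.Set (List Char)) (L : List Nat) :
    List (Nat × List Char) :=
  ((L.filter (fun i => (pvScan stamp curr i (List.range m) false curr).1 &&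
      (pvScan stamp curr i (List.range m) false curr).2.1)).map
    (fun i => (i, (pvScan stamp curr i (List.range m) false curr).2.2))).filter
      (fun it => !(PySem.Set.contains seen it.2))

lemma pvKeptA_eq (stamp : List Char) (m n : Nat) (seen : PySem.Set (List Char))
    (sp : List Char × List Nat) :
    pvKeptA stamp m n seen sp
      = (pvKeptOn stamp sp.1 m seen (List.range (n + 1 - m))).map
          (fun it => (it.2, sp.2 ++ [it.1])) := rfl

lemma pvFoldA_char (stamp curr : List Char) (m : Nat) (path : List Nat)
    (seen : PySem.Set (List Char)) :
    ∀ (L : List Nat) (q0 : List (List Char × List Nat)) (v : PySem.Dict (List Char) Nat)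
      (news : List (List Char)),
      pvInvMid v seen news (path.length + 1) →
      (L.foldl (pvBodyA curr stamp m path) (q0, v)).1
          = q0 ++ (pvKeptOn stamp curr m seen L).map (fun it => (it.2, path ++ [it.1]))
      ∧ pvInvMid (L.foldl (pvBodyA curr stamp m path) (q0, v)).2 seen
          (news ++ (pvKeptOn stamp curr m seen L).map (fun it => it.2)) (path.length + 1) := by
  intro L
  induction L with
  | nil =>
    intro q0 v news hInv
    exact ⟨by simp [pvKeptOn], by simpa [pvKeptOn] using hInv⟩
  | cons i L ih =>
    intro q0 v news hInv
    simp only [List.foldl_cons, pvBodyA_apply]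
    by_cases hflag : ((pvScan stamp curr i (List.range m) false curr).1 &&
        (pvScan stamp curr i (List.range m) false curr).2.1) = true
    · rw [if_pos hflag]
      have hacc := pvAccept_iff v seen news (path.length + 1) hInv
        (pvScan stamp curr i (List.range m) false curr).2.2
      by_cases hseen : PySem.Set.contains seen (pvScan stamp curr i (List.range m) false curr).2.2 = true
      · have hcond : ((!(v.contains (pvScan stamp curr i (List.range m) false curr).2.2))
            || (v.getD (pvScan stamp curr i (List.range m) false curr).2.2 0 == path.length + 1)) = false := by
          rw [hacc, hseen]; rfl
        rw [if_neg (by rw [hcond]; exact Bool.false_ne_true)]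
        have hmem := (PySem.Set.contains_iff _ _).1 hseen
        have hk : pvKeptOn stamp curr m seen (i :: L) = pvKeptOn stamp curr m seen L := by
          simp [pvKeptOn, List.filter_cons, hflag, hseen, hmem]
        rw [hk]
        exact ih q0 v news hInv
      · have hsf : PySem.Set.contains seen (pvScan stamp curr i (List.range m) false curr).2.2 = false := by
          revert hseen
          cases PySem.Set.contains seen (pvScan stamp curr i (List.range m) false curr).2.2 <;> simp
        have hns : (pvScan stamp curr i (List.range m) false curr).2.2 ∉ seen := by
          intro hmem
          rw [(PySem.Set.contains_iff _ _).2 hmem] at hsf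
          simp at hsf
        have hcond : ((!(v.contains (pvScan stamp curr i (List.range m) false curr).2.2))
            || (v.getD (pvScan stamp curr i (List.range m) false curr).2.2 0 == path.length + 1)) = true := by
          rw [hacc, hsf]; rfl
        rw [if_pos hcond]
        have hInv' := pvInvMid_insert v seen news (path.length + 1)
          (pvScan stamp curr i (List.range m) false curr).2.2 hInv hns
        have hk : pvKeptOn stamp curr m seen (i :: L)
            = (i, (pvScan stamp curr i (List.range m) false curr).2.2) :: pvKeptOn stamp curr m seen L := by
          simp [pvKeptOn, List.filter_cons, hflag, hsf, hns]
        rw [hk]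
        obtain ⟨ih1, ih2⟩ := ih (q0 ++ [((pvScan stamp curr i (List.range m) false curr).2.2, path ++ [i])])
          (v.insert (pvScan stamp curr i (List.range m) false curr).2.2 (path.length + 1))
          (news ++ [(pvScan stamp curr i (List.range m) false curr).2.2]) hInv'
        constructor
        · rw [ih1]; simp
        · simpa [List.append_assoc] using ih2
    · rw [if_neg hflag]
      have hk : pvKeptOn stamp curr m seen (i :: L) = pvKeptOn stamp curr m seen L := by
        simp [pvKeptOn, List.filter_cons, hflag]
      rw [hk]
      exact ih q0 v news hInv

lemma pvLoopA_congr (stamp : List Char) (m n : Nat) (goal : List Char)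
    {q1 q2 : List (List Char × List Nat)} (h : q1 = q2)
    (v : PySem.Dict (List Char) Nat) (minDist : Option Nat) (allPaths : List String)
    (hq1 : ∀ sp ∈ q1, sp.1.length = n) (hq2 : ∀ sp ∈ q2, sp.1.length = n) :
    pvLoopA stamp m n goal q1 v minDist allPaths hq1
      = pvLoopA stamp m n goal q2 v minDist allPaths hq2 := by
  subst h; rfl

lemma pvLoopA_nil (stamp : List Char) (m n : Nat) (goal : List Char)
    (v : PySem.Dict (List Char) Nat) (minDist : Option Nat) (allPaths : List String)
    (hq : ∀ sp ∈ ([] : List (List Char × List Nat)), sp.1.length = n) :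
    pvLoopA stamp m n goal [] v minDist allPaths hq = allPaths := by
  rw [pvLoopA]

lemma pvLoopA_cons (stamp : List Char) (m n : Nat) (goal curr : List Char) (path : List Nat)
    (rest : List (List Char × List Nat)) (v : PySem.Dict (List Char) Nat)
    (minDist : Option Nat) (allPaths : List String)
    (hq : ∀ sp ∈ (curr, path) :: rest, sp.1.length = n) :
    pvLoopA stamp m n goal ((curr, path) :: rest) v minDist allPaths hq =
      if pvGtA path.length minDist then allPaths
      else if curr = goal then
        pvLoopA stamp m n goal rest v (some path.length)
          (allPaths ++ [pvRender path.reverse])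
          (fun sp h => hq sp (List.mem_cons_of_mem _ h))
      else
        pvLoopA stamp m n goal
          ((List.range (n + 1 - m)).foldl (pvBodyA curr stamp m path) (rest, v)).1
          ((List.range (n + 1 - m)).foldl (pvBodyA curr stamp m path) (rest, v)).2
          minDist allPaths
          (by
            have hcur : curr.length = n := hq (curr, path) List.mem_cons_self
            obtain ⟨E, hE1, _, hE3⟩ := pvFoldA_shape curr stamp m path (List.range (n + 1 - m))
              (by intro i hi; rw [hcur]; have := List.mem_range.1 hi; omega) rest v
            intro sp hsp
            rw [hE1] at hsp
            rcases List.mem_append.1 hsp with h | h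
            · exact hq sp (List.mem_cons_of_mem _ h)
            · rw [(hE3 sp h).1, hcur]) := by
  rw [pvLoopA]

-- A finishes a layer in which the goal has already been seen: it only collects the
-- remaining goal hits of this layer.
lemma pvLayerA_post (stamp goal : List Char) (m n k : Nat) :
    ∀ (La N : List (List Char × List Nat)) (v : PySem.Dict (List Char) Nat) (acc : List String)
      (hLa : ∀ sp ∈ La, sp.2.length = k) (hN : ∀ sp ∈ N, sp.2.length = k + 1)
      (hq : ∀ sp ∈ La ++ N, sp.1.length = n),
      pvLoopA stamp m n goal (La ++ N) v (some k) acc hq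
        = acc ++ (La.filter (fun sp => sp.1 == goal)).map (fun sp => pvRender sp.2.reverse) := by
  intro La
  induction La with
  | nil =>
    intro N v acc hLa hN hq
    rw [pvLoopA_congr stamp m n goal (q1 := [] ++ N) (q2 := N) rfl v (some k) acc hq
      (by intro sp h; exact hq sp (by simpa using h))]
    cases N with
    | nil => rw [pvLoopA_nil]; simp
    | cons e N' =>
      obtain ⟨s, p⟩ := e
      rw [pvLoopA_cons]
      have hp : p.length = k + 1 := hN (s, p) List.mem_cons_self
      rw [if_pos (by simp [pvGtA, hp])]
      simp
  | cons hd La ih =>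
    obtain ⟨curr, path⟩ := hd
    intro N v acc hLa hN hq
    have hpl : path.length = k := hLa (curr, path) List.mem_cons_self
    have hcur : curr.length = n := hq (curr, path) (by simp)
    rw [pvLoopA_congr stamp m n goal (q1 := ((curr, path) :: La) ++ N)
      (q2 := (curr, path) :: (La ++ N)) rfl v (some k) acc hq
      (by intro sp h; exact hq sp (by simpa using h))]
    rw [pvLoopA_cons]
    rw [if_neg (by simp [pvGtA, hpl])]
    by_cases hcg : curr = goal
    · rw [if_pos hcg]
      rw [show (some path.length) = some k from by rw [hpl]]
      have h := ih N v (acc ++ [pvRender path.reverse])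
        (fun sp hsp => hLa sp (List.mem_cons_of_mem _ hsp)) hN
        (by
          intro sp hsp
          rcases List.mem_append.1 hsp with h | h
          · exact hq sp (List.mem_append.2 (Or.inl (List.mem_cons_of_mem _ h)))
          · exact hq sp (List.mem_append.2 (Or.inr h)))
      exact h.trans (by simp [List.filter_cons, hcg, List.append_assoc])
    · rw [if_neg hcg]
      obtain ⟨E, hE1, hE2, hE3⟩ := pvFoldA_shape curr stamp m path (List.range (n + 1 - m))
        (by intro i hi; rw [hcur]; have := List.mem_range.1 hi; omega) (La ++ N) v
      have hsh : ((List.range (n + 1 - m)).foldl (pvBodyA curr stamp m path) (La ++ N, v)).1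
          = La ++ (N ++ E) := by rw [hE1, List.append_assoc]
      have hq2 : ∀ sp ∈ La ++ (N ++ E), sp.1.length = n := by
        intro sp hsp
        rcases List.mem_append.1 hsp with h | h
        · exact hq sp (by simp [h])
        · rcases List.mem_append.1 h with h | h
          · exact hq sp (by simp [h])
          · rw [(hE3 sp h).1, hcur]
      rw [pvLoopA_congr stamp m n goal hsh _ (some k) acc _ hq2]
      have h := ih (N ++ E)
        ((List.range (n + 1 - m)).foldl (pvBodyA curr stamp m path) (La ++ N, v)).2 acc
        (fun sp hsp => hLa sp (List.mem_cons_of_mem _ hsp))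
        (by
          intro sp hsp
          rcases List.mem_append.1 hsp with h | h
          · exact hN sp h
          · rw [(hE3 sp h).2.2, hpl])
        hq2
      exact h.trans (by simp [List.filter_cons, hcg])

-- A working through a layer that contains the goal returns exactly this layer's goal hits.
lemma pvLayerA_goal (stamp goal : List Char) (m n k : Nat) :
    ∀ (La N : List (List Char × List Nat)) (v : PySem.Dict (List Char) Nat)
      (hLa : ∀ sp ∈ La, sp.2.length = k) (hN : ∀ sp ∈ N, sp.2.length = k + 1)
      (hg : ∃ sp ∈ La, sp.1 = goal)
      (hq : ∀ sp ∈ La ++ N, sp.1.length = n),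
      pvLoopA stamp m n goal (La ++ N) v none [] hq
        = (La.filter (fun sp => sp.1 == goal)).map (fun sp => pvRender sp.2.reverse) := by
  intro La
  induction La with
  | nil =>
    intro N v hLa hN hg hq
    obtain ⟨sp, hsp, _⟩ := hg
    simp at hsp
  | cons hd La ih =>
    obtain ⟨curr, path⟩ := hd
    intro N v hLa hN hg hq
    have hpl : path.length = k := hLa (curr, path) List.mem_cons_self
    have hcur : curr.length = n := hq (curr, path) (by simp)
    rw [pvLoopA_congr stamp m n goal (q1 := ((curr, path) :: La) ++ N)
      (q2 := (curr, path) :: (La ++ N)) rfl v none [] hq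
      (by intro sp h; exact hq sp (by simpa using h))]
    rw [pvLoopA_cons]
    rw [if_neg (by simp [pvGtA])]
    by_cases hcg : curr = goal
    · rw [if_pos hcg]
      rw [show (some path.length) = some k from by rw [hpl]]
      have h := pvLayerA_post stamp goal m n k La N v ([] ++ [pvRender path.reverse])
        (fun sp hsp => hLa sp (List.mem_cons_of_mem _ hsp)) hN
        (by
          intro sp hsp
          rcases List.mem_append.1 hsp with h | h
          · exact hq sp (List.mem_append.2 (Or.inl (List.mem_cons_of_mem _ h)))
          · exact hq sp (List.mem_append.2 (Or.inr h)))
      exact h.trans (by simp [List.filter_cons, hcg])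
    · rw [if_neg hcg]
      obtain ⟨E, hE1, hE2, hE3⟩ := pvFoldA_shape curr stamp m path (List.range (n + 1 - m))
        (by intro i hi; rw [hcur]; have := List.mem_range.1 hi; omega) (La ++ N) v
      have hsh : ((List.range (n + 1 - m)).foldl (pvBodyA curr stamp m path) (La ++ N, v)).1
          = La ++ (N ++ E) := by rw [hE1, List.append_assoc]
      have hq2 : ∀ sp ∈ La ++ (N ++ E), sp.1.length = n := by
        intro sp hsp
        rcases List.mem_append.1 hsp with h | h
        · exact hq sp (by simp [h])
        · rcases List.mem_append.1 h with h | h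
          · exact hq sp (by simp [h])
          · rw [(hE3 sp h).1, hcur]
      rw [pvLoopA_congr stamp m n goal hsh _ none [] _ hq2]
      have hg' : ∃ sp ∈ La, sp.1 = goal := by
        obtain ⟨sp, hsp, hspg⟩ := hg
        rcases List.mem_cons.1 hsp with rfl | hsp
        · exact absurd hspg hcg
        · exact ⟨sp, hsp, hspg⟩
      have h := ih (N ++ E)
        ((List.range (n + 1 - m)).foldl (pvBodyA curr stamp m path) (La ++ N, v)).2
        (fun sp hsp => hLa sp (List.mem_cons_of_mem _ hsp))
        (by
          intro sp hsp
          rcases List.mem_append.1 hsp with h | h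
          · exact hN sp h
          · rw [(hE3 sp h).2.2, hpl])
        hg' hq2
      exact h.trans (by simp [List.filter_cons, hcg])

-- A working through a goal-free layer expands it into exactly the kept moves, and the
-- visited dict keeps tracking the seen set.
lemma pvLayerA_nogoal (stamp goal : List Char) (m n k : Nat) :
    ∀ (La N : List (List Char × List Nat)) (v : PySem.Dict (List Char) Nat)
      (news : List (List Char)) (seen : PySem.Set (List Char))
      (hLa : ∀ sp ∈ La, sp.2.length = k) (hLa2 : ∀ sp ∈ La, sp.1 ≠ goal)
      (hN : ∀ sp ∈ N, sp.2.length = k + 1)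
      (hInv : pvInvMid v seen news (k + 1))
      (hq : ∀ sp ∈ La ++ N, sp.1.length = n)
      (hq2 : ∀ sp ∈ N ++ La.flatMap (pvKeptA stamp m n seen), sp.1.length = n),
      ∃ v', pvLoopA stamp m n goal (La ++ N) v none [] hq
          = pvLoopA stamp m n goal (N ++ La.flatMap (pvKeptA stamp m n seen)) v' none [] hq2
        ∧ pvInvMid v' seen
            (news ++ (La.flatMap (pvKeptA stamp m n seen)).map (fun sp => sp.1)) (k + 1) := by
  intro La
  induction La with
  | nil =>
    intro N v news seen hLa hLa2 hN hInv hq hq2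
    refine ⟨v, ?_, by simpa using hInv⟩
    rw [pvLoopA_congr stamp m n goal (q1 := [] ++ N) (q2 := N) rfl v none [] hq
      (by intro sp h; exact hq sp (by simpa using h))]
    exact pvLoopA_congr stamp m n goal (by simp) v none [] _ hq2
  | cons hd La ih =>
    obtain ⟨curr, path⟩ := hd
    intro N v news seen hLa hLa2 hN hInv hq hq2
    have hpl : path.length = k := hLa (curr, path) List.mem_cons_self
    have hcur : curr.length = n := hq (curr, path) (by simp)
    have hcg : curr ≠ goal := hLa2 (curr, path) List.mem_cons_self
    rw [pvLoopA_congr stamp m n goal (q1 := ((curr, path) :: La) ++ N)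
      (q2 := (curr, path) :: (La ++ N)) rfl v none [] hq
      (by intro sp h; exact hq sp (by simpa using h))]
    rw [pvLoopA_cons]
    rw [if_neg (by simp [pvGtA])]
    rw [if_neg hcg]
    have hInvP : pvInvMid v seen news (path.length + 1) := by rw [hpl]; exact hInv
    obtain ⟨hF1, hF2⟩ := pvFoldA_char stamp curr m path seen (List.range (n + 1 - m))
      (La ++ N) v news hInvP
    have hKA : pvKeptA stamp m n seen (curr, path)
        = (pvKeptOn stamp curr m seen (List.range (n + 1 - m))).map
            (fun it => (it.2, path ++ [it.1])) := pvKeptA_eq stamp m n seen (curr, path)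
    have hsh : ((List.range (n + 1 - m)).foldl (pvBodyA curr stamp m path) (La ++ N, v)).1
        = La ++ (N ++ pvKeptA stamp m n seen (curr, path)) := by
      rw [hF1, List.append_assoc, hKA]
    have hKf := pvKeptA_facts stamp m n seen (curr, path) hcur
    have hq2' : ∀ sp ∈ La ++ (N ++ pvKeptA stamp m n seen (curr, path)), sp.1.length = n := by
      intro sp hsp
      rcases List.mem_append.1 hsp with h | h
      · exact hq sp (by simp [h])
      · rcases List.mem_append.1 h with h | h
        · exact hq sp (by simp [h])
        · exact (hKf sp h).1
    rw [pvLoopA_congr stamp m n goal hsh _ none [] _ hq2']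
    have hInv2 : pvInvMid
        ((List.range (n + 1 - m)).foldl (pvBodyA curr stamp m path) (La ++ N, v)).2 seen
        (news ++ (pvKeptA stamp m n seen (curr, path)).map (fun sp => sp.1)) (k + 1) := by
      rw [← hpl]
      have : (pvKeptA stamp m n seen (curr, path)).map (fun sp => sp.1)
          = (pvKeptOn stamp curr m seen (List.range (n + 1 - m))).map (fun it => it.2) := by
        rw [hKA, List.map_map]; rfl
      rw [this]
      exact hF2
    obtain ⟨v', hv1, hv2⟩ := ih (N ++ pvKeptA stamp m n seen (curr, path))
      ((List.range (n + 1 - m)).foldl (pvBodyA curr stamp m path) (La ++ N, v)).2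
      (news ++ (pvKeptA stamp m n seen (curr, path)).map (fun sp => sp.1)) seen
      (fun sp hsp => hLa sp (List.mem_cons_of_mem _ hsp))
      (fun sp hsp => hLa2 sp (List.mem_cons_of_mem _ hsp))
      (by
        intro sp hsp
        rcases List.mem_append.1 hsp with h | h
        · exact hN sp h
        · rw [(hKf sp h).2.2, hpl])
      hInv2 hq2'
      (by
        intro sp hsp
        rcases List.mem_append.1 hsp with h | h
        · rcases List.mem_append.1 h with h | h
          · exact hq sp (by simp [h])
          · exact (hKf sp h).1
        · obtain ⟨p, hp, hmem⟩ := List.mem_flatMap.1 h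
          exact (pvKeptA_facts stamp m n seen p (hq p (by simp [hp])) sp hmem).1)
    refine ⟨v', ?_, ?_⟩
    · rw [hv1]
      refine pvLoopA_congr stamp m n goal ?_ v' none [] _ hq2
      rw [List.flatMap_cons, List.append_assoc]
    · have := hv2
      simpa [List.flatMap_cons, List.map_append, List.append_assoc] using this

lemma pvLevels_nil (stamp : List Char) (m n : Nat) (goal : List Char)
    (seen : PySem.Set (List Char))
    (hq : ∀ sp ∈ ([] : List (List Char × List Nat)), sp.1.length = n) :
    pvLevels stamp m n goal [] seen hq = ["FAILED"] := by
  rw [pvLevels]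
  simp

-- main simulation: A's loop (plus A's final formatting) equals the level-synchronous form
lemma pvSimA (stamp : List Char) (m n : Nat) :
    ∀ (M k : Nat) (La : List (List Char × List Nat)) (v : PySem.Dict (List Char) Nat)
      (seen : PySem.Set (List Char))
      (hM : pvMu n La ≤ M)
      (hlen : ∀ sp ∈ La, sp.2.length = k)
      (hInv : pvInvMid v seen [] (k + 1))
      (hqA : ∀ sp ∈ La, sp.1.length = n),
      (if pvLoopA stamp m n (List.replicate n '?') La v none [] hqA = [] then ["FAILED"]
       else PySem.List.sorted
         (PySem.Set.ofList (pvLoopA stamp m n (List.replicate n '?') La v none [] hqA))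
         (fun x => x) false)
      = pvLevels stamp m n (List.replicate n '?') La seen hqA := by
  intro M
  induction M with
  | zero =>
    intro k La v seen hM hlen hInv hqA
    have hnil : La = [] := by
      cases La with
      | nil => rfl
      | cons e La =>
        exfalso
        rw [pvMu_cons] at hM
        have : 0 < (n+2) ^ pvCnt e.1 := Nat.pow_pos (by omega)
        omega
    subst hnil
    rw [pvLoopA_nil, pvLevels_nil]
    simp
  | succ M ihM =>
    intro k La v seen hM hlen hInv hqA
    cases La with
    | nil =>
      rw [pvLoopA_nil, pvLevels_nil]
      simp
    | cons hd La' =>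
      by_cases hg : ∃ sp ∈ (hd :: La'), sp.1 = List.replicate n '?'
      · -- the goal lies in this layer: both sides return its formatted hits
        have hqA' : ∀ sp ∈ (hd :: La') ++ [], sp.1.length = n := by
          intro sp h; exact hqA sp (by simpa using h)
        have hA := pvLayerA_goal stamp (List.replicate n '?') m n k (hd :: La') [] v
          hlen (by simp) hg hqA'
        rw [pvLoopA_congr stamp m n (List.replicate n '?')
          (q1 := hd :: La') (q2 := (hd :: La') ++ []) (by simp) v none [] hqA hqA']
        rw [hA]
        obtain ⟨spg, hspg, hspg2⟩ := hg
        have hne2 : ((hd :: La').filter (fun sp => sp.1 == List.replicate n '?')).map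
            (fun sp => pvRender sp.2.reverse) ≠ [] := by
          have : spg ∈ (hd :: La').filter (fun sp => sp.1 == List.replicate n '?') :=
            List.mem_filter.2 ⟨hspg, by simp [hspg2]⟩
          intro hcon
          rw [List.map_eq_nil_iff] at hcon
          rw [hcon] at this
          simp at this
        rw [if_neg hne2]
        rw [pvLevels]
        rw [dif_neg (by simp : ¬(hd :: La' = []))]
        rw [if_pos hne2]
      · -- goal-free layer: both sides step to the next layer
        replace hg : ∀ sp ∈ hd :: La', sp.1 ≠ List.replicate n '?' :=
          fun sp hsp h => hg ⟨sp, hsp, h⟩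
        have hqA' : ∀ sp ∈ (hd :: La') ++ [], sp.1.length = n := by
          intro sp h; exact hqA sp (by simpa using h)
        have hq2 : ∀ sp ∈ [] ++ (hd :: La').flatMap (pvKeptA stamp m n seen),
            sp.1.length = n := by
          intro sp hsp
          rw [List.nil_append] at hsp
          obtain ⟨p, hp, hmem⟩ := List.mem_flatMap.1 hsp
          exact (pvKeptA_facts stamp m n seen p (hqA p hp) sp hmem).1
        obtain ⟨v', hv1, hv2⟩ := pvLayerA_nogoal stamp (List.replicate n '?') m n k
          (hd :: La') [] v [] seen hlen hg (by simp) (by simpa using hInv) hqA' hq2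
        rw [pvLoopA_congr stamp m n (List.replicate n '?')
          (q1 := hd :: La') (q2 := (hd :: La') ++ []) (by simp) v none [] hqA hqA']
        rw [hv1]
        -- level side
        rw [pvLevels]
        rw [dif_neg (by simp : ¬(hd :: La' = []))]
        have hfilter : (hd :: La').filter (fun sp => sp.1 == List.replicate n '?') = [] := by
          rw [List.filter_eq_nil_iff]
          intro sp hsp
          simp [hg sp hsp]
        simp only [hfilter, List.map_nil]
        rw [if_neg (show ¬(([] : List String) ≠ []) by simp)]
        have hqA2 : ∀ sp ∈ (hd :: La').flatMap (pvKeptA stamp m n seen), sp.1.length = n :=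
          fun sp hsp => hq2 sp (by simpa using hsp)
        rw [pvLoopA_congr stamp m n (List.replicate n '?') (List.nil_append _)
          v' none [] hq2 hqA2]
        have hv2' : pvInvMid v' seen
            (((hd :: La').flatMap (pvKeptA stamp m n seen)).map (fun sp => sp.1)) (k + 1) := by
          simpa using hv2
        have hM' : pvMu n ((hd :: La').flatMap (pvKeptA stamp m n seen)) ≤ M := by
          have := pvMuB_lt n (pvKeptA stamp m n seen) (hd :: La') (by simp)
            (fun sp hsp => pvKeptA_mu stamp m n seen sp (hqA sp hsp))
          omega
        have hlen' : ∀ sp ∈ (hd :: La').flatMap (pvKeptA stamp m n seen),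
            sp.2.length = k + 1 := by
          intro sp hsp
          obtain ⟨p, hp, hmem⟩ := List.mem_flatMap.1 hsp
          rw [(pvKeptA_facts stamp m n seen p (hqA p hp) sp hmem).2.2, hlen p hp]
        have hInv' : pvInvMid v'
            (PySem.Set.union seen (PySem.Set.ofList
              (((hd :: La').flatMap (pvKeptA stamp m n seen)).map (fun sp => sp.1))))
            [] (k + 1 + 1) := by
          obtain ⟨i1, i2, i3⟩ := hv2'
          have hm2 : ∀ t : List Char, t ∈ PySem.Set.union seen (PySem.Set.ofList
                (((hd :: La').flatMap (pvKeptA stamp m n seen)).map (fun sp => sp.1)))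
              ↔ t ∈ seen ∨ t ∈ ((hd :: La').flatMap (pvKeptA stamp m n seen)).map
                  (fun sp => sp.1) := by
            intro t
            rw [PySem.Set.mem_union, PySem.Set.mem_ofList]
          refine ⟨by simp, ?_, ?_⟩
          · intro t ht
            rcases (hm2 t).1 ht with h | h
            · obtain ⟨d, hd1, hd2⟩ := i2 t h
              exact ⟨d, hd1, by omega⟩
            · exact ⟨k + 1, (i1 t h).1, by omega⟩
          · intro t hc
            rcases i3 t hc with h | h
            · exact Or.inl ((hm2 t).2 (Or.inl h))
            · exact Or.inl ((hm2 t).2 (Or.inr h))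
        exact ihM (k + 1) ((hd :: La').flatMap (pvKeptA stamp m n seen)) v' _ hM' hlen' hInv'
          hqA2

-- ---------- B-side semantics: runs, reachability, depth-bounded DFS ----------

lemma pvApplyGo_eq (stamp s : List Char) (i : Nat) :
    ∀ (js : List Nat) (hv : Bool) (temp : List Char),
      pvApplyGo stamp s i js hv temp =
        (if (pvScan stamp s i js hv temp).1 && (pvScan stamp s i js hv temp).2.1
         then some (pvScan stamp s i js hv temp).2.2 else none) := by
  intro js
  induction js with
  | nil =>
    intro hv temp
    cases hv <;> rfl
  | cons j js ih =>
    intro hv temp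
    rw [pvApplyGo, pvScan]
    by_cases hc1 : s.getD (i + j) ' ' = '?'
    · simp only [hc1, if_pos rfl]
      exact ih hv temp
    · rw [if_neg hc1, if_neg hc1]
      by_cases hc2 : s.getD (i + j) ' ' = stamp.getD j ' '
      · rw [if_neg (by simpa using hc2), if_pos hc2]
        exact ih true (temp.set (i + j) '?')
      · rw [if_pos (by simpa using hc2), if_neg hc2]
        simp

lemma pvApply_some_iff (stamp s : List Char) (i m : Nat) (t : List Char) :
    pvApply stamp s i m = some t ↔
      ((pvScan stamp s i (List.range m) false s).1
        && (pvScan stamp s i (List.range m) false s).2.1) = true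
      ∧ (pvScan stamp s i (List.range m) false s).2.2 = t := by
  rw [pvApply, pvApplyGo_eq]
  split
  · rename_i hfl
    simp [hfl]
  · rename_i hfl
    simp [hfl]

lemma pvApply_facts (stamp s t : List Char) (i m n : Nat) (hs : s.length = n)
    (hi : i < n + 1 - m) (ht : pvApply stamp s i m = some t) :
    t.length = n ∧ pvCnt t < pvCnt s := by
  obtain ⟨hfl, rfl⟩ := (pvApply_some_iff stamp s i m t).1 ht
  rw [Bool.and_eq_true] at hfl
  have him : i + m ≤ s.length := by omega
  have := pvScan_child stamp s i m him
  exact ⟨by rw [this.1, hs], this.2 hfl.1 hfl.2⟩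

def pvRun (stamp : List Char) (m : Nat) : List Char → List Nat → Option (List Char)
  | s, [] => some s
  | s, i :: is =>
    match pvApply stamp s i m with
    | none => none
    | some t => pvRun stamp m t is

def pvOk (nm : Nat) (p : List Nat) : Prop := ∀ i ∈ p, i < nm

def pvReach (stamp target : List Char) (m nm : Nat) (s : List Char) (d : Nat) : Prop :=
  ∃ p : List Nat, p.length = d ∧ pvOk nm p ∧ pvRun stamp m target p = some s

lemma pvRun_append (stamp : List Char) (m : Nat) :
    ∀ (p q : List Nat) (s : List Char),
      pvRun stamp m s (p ++ q) = (pvRun stamp m s p).bind (fun u => pvRun stamp m u q) := by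
  intro p
  induction p with
  | nil => intro q s; rfl
  | cons i p ih =>
    intro q s
    rw [List.cons_append, pvRun, pvRun]
    cases happ : pvApply stamp s i m with
    | none => rfl
    | some t => exact ih q t

lemma pvRun_single (stamp : List Char) (m : Nat) (s : List Char) (i : Nat) :
    pvRun stamp m s [i] = pvApply stamp s i m := by
  rw [pvRun]
  cases happ : pvApply stamp s i m <;> rfl

lemma pvRun_facts (stamp : List Char) (m n : Nat) :
    ∀ (p : List Nat) (s t : List Char), s.length = n → pvOk (n + 1 - m) p →
      pvRun stamp m s p = some t → t.length = n ∧ pvCnt t + p.length ≤ pvCnt s := by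
  intro p
  induction p with
  | nil =>
    intro s t hs _ hr
    rw [pvRun] at hr
    cases hr
    exact ⟨hs, by simp⟩
  | cons i p ih =>
    intro s t hs hok hr
    rw [pvRun] at hr
    cases happ : pvApply stamp s i m with
    | none => rw [happ] at hr; cases hr
    | some u =>
      rw [happ] at hr
      have hu := pvApply_facts stamp s u i m n hs (hok i List.mem_cons_self) happ
      have := ih u t hu.1 (fun j hj => hok j (List.mem_cons_of_mem _ hj)) hr
      exact ⟨this.1, by simp only [List.length_cons]; omega⟩

lemma pvCnt_replicate (n : Nat) : pvCnt (List.replicate n '?') = 0 := by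
  simp [pvCnt]

-- closed form of B's DFS expansion (both components of the fold)
lemma pvDfs_fold (stamp goal : List Char) (m n d : Nat) (s : List Char) :
    ∀ (L : List Nat) (acc : List (List Nat) × Bool),
      L.foldl (fun ra i =>
        match pvApply stamp s i m with
        | none => ra
        | some t =>
          (ra.1 ++ ((pvDfs stamp goal m n d t).1.map (fun rest => i :: rest)),
            ra.2 || (pvDfs stamp goal m n d t).2)) acc
      = (acc.1 ++ L.flatMap (fun i =>
            match pvApply stamp s i m with
            | none => []
            | some t => (pvDfs stamp goal m n d t).1.map (fun rest => i :: rest)),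
         acc.2 || L.any (fun i =>
            match pvApply stamp s i m with
            | none => false
            | some t => (pvDfs stamp goal m n d t).2)) := by
  intro L
  induction L with
  | nil =>
    intro acc
    simp
  | cons i L ih =>
    intro acc
    rw [List.foldl_cons, List.flatMap_cons, List.any_cons]
    cases happ : pvApply stamp s i m with
    | none =>
      rw [ih acc]
      simp [happ]
    | some t =>
      rw [ih _]
      simp [happ, List.append_assoc, Bool.or_assoc]

lemma pvDfs_succ1 (stamp goal : List Char) (m n d : Nat) (s : List Char) :
    (pvDfs stamp goal m n (d+1) s).1 =
      (List.range (n + 1 - m)).flatMap (fun i =>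
        match pvApply stamp s i m with
        | none => []
        | some t => (pvDfs stamp goal m n d t).1.map (fun rest => i :: rest)) := by
  rw [pvDfs, pvDfs_fold]
  simp

lemma pvDfs_succ2 (stamp goal : List Char) (m n d : Nat) (s : List Char) :
    (pvDfs stamp goal m n (d+1) s).2 =
      (List.range (n + 1 - m)).any (fun i =>
        match pvApply stamp s i m with
        | none => false
        | some t => (pvDfs stamp goal m n d t).2) := by
  rw [pvDfs, pvDfs_fold]
  simp

lemma pvDfs_mem (stamp goal : List Char) (m n : Nat) :
    ∀ (d : Nat) (s : List Char) (seq : List Nat),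
      seq ∈ (pvDfs stamp goal m n d s).1 ↔
        seq.length = d ∧ pvOk (n + 1 - m) seq ∧ pvRun stamp m s seq = some goal := by
  intro d
  induction d with
  | zero =>
    intro s seq
    show seq ∈ (if s = goal then [[]] else []) ↔ _
    by_cases hsg : s = goal
    · rw [if_pos hsg]
      constructor
      · intro h
        rw [List.mem_singleton] at h
        subst h
        exact ⟨rfl, by intro i hi; simp at hi, by rw [pvRun, hsg]⟩
      · intro ⟨h1, _, _⟩
        rw [List.length_eq_zero_iff] at h1
        subst h1
        simp
    · rw [if_neg hsg]
      constructor
      · intro h; simp at h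
      · intro ⟨h1, _, h3⟩
        rw [List.length_eq_zero_iff] at h1
        subst h1
        rw [pvRun] at h3
        cases h3
        exact absurd rfl hsg
  | succ d ih =>
    intro s seq
    rw [pvDfs_succ1, List.mem_flatMap]
    constructor
    · intro ⟨i, hi, hmem⟩
      cases happ : pvApply stamp s i m with
      | none => rw [happ] at hmem; simp at hmem
      | some t =>
        rw [happ] at hmem
        obtain ⟨rest, hrest, rfl⟩ := List.mem_map.1 hmem
        obtain ⟨hl, hok, hrun⟩ := (ih t rest).1 hrest
        refine ⟨by simp [hl], ?_, ?_⟩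
        · intro j hj
          rcases List.mem_cons.1 hj with rfl | hj
          · exact List.mem_range.1 hi
          · exact hok j hj
        · rw [pvRun, happ]
          exact hrun
    · intro ⟨hl, hok, hrun⟩
      cases seq with
      | nil => simp at hl
      | cons i rest =>
        rw [pvRun] at hrun
        cases happ : pvApply stamp s i m with
        | none => rw [happ] at hrun; cases hrun
        | some t =>
          rw [happ] at hrun
          refine ⟨i, List.mem_range.2 (hok i List.mem_cons_self), ?_⟩
          rw [happ]
          exact List.mem_map.2 ⟨rest, (ih t rest).2
            ⟨by simpa using hl, fun j hj => hok j (List.mem_cons_of_mem _ hj), hrun⟩, rfl⟩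

lemma pvDfs_alive (stamp goal : List Char) (m n : Nat) :
    ∀ (d : Nat) (s : List Char),
      (pvDfs stamp goal m n d s).2 = true ↔
        ∃ p : List Nat, p.length = d ∧ pvOk (n + 1 - m) p ∧
          (pvRun stamp m s p).isSome := by
  intro d
  induction d with
  | zero =>
    intro s
    constructor
    · intro _
      exact ⟨[], rfl, by intro i hi; simp at hi, by rw [pvRun]; rfl⟩
    · intro _
      rfl
  | succ d ih =>
    intro s
    rw [pvDfs_succ2, List.any_eq_true]
    constructor
    · intro ⟨i, hi, hal⟩
      cases happ : pvApply stamp s i m with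
      | none => rw [happ] at hal; simp at hal
      | some t =>
        rw [happ] at hal
        obtain ⟨p, hl, hok, hsome⟩ := (ih t).1 hal
        refine ⟨i :: p, by simp [hl], ?_, ?_⟩
        · intro j hj
          rcases List.mem_cons.1 hj with rfl | hj
          · exact List.mem_range.1 hi
          · exact hok j hj
        · rw [pvRun, happ]
          exact hsome
    · intro ⟨p, hl, hok, hsome⟩
      cases p with
      | nil => simp at hl
      | cons i rest =>
        rw [pvRun] at hsome
        cases happ : pvApply stamp s i m with
        | none => rw [happ] at hsome; simp at hsome
        | some t =>
          rw [happ] at hsome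
          refine ⟨i, List.mem_range.2 (hok i List.mem_cons_self), ?_⟩
          rw [happ]
          exact (ih t).2 ⟨rest, by simpa using hl,
            fun j hj => hok j (List.mem_cons_of_mem _ hj), hsome⟩

-- membership characterization of A's kept expansion
lemma mem_pvKeptA (stamp : List Char) (m n : Nat) (seen : PySem.Set (List Char))
    (s t : List Char) (p q : List Nat) :
    (t, q) ∈ pvKeptA stamp m n seen (s, p) ↔
      ∃ i, i < n + 1 - m ∧ pvApply stamp s i m = some t ∧ t ∉ seen ∧ q = p ++ [i] := by
  constructor
  · intro h
    simp only [pvKeptA, pvMoves, List.mem_map, List.mem_filter, List.mem_range] at h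
    obtain ⟨it, ⟨⟨i, ⟨hi, hfl⟩, rfl⟩, hns⟩, heq⟩ := h
    rw [Prod.mk.injEq] at heq
    refine ⟨i, hi, ?_, ?_, heq.2.symm⟩
    · rw [pvApply_some_iff]
      exact ⟨hfl, heq.1⟩
    · intro hmem
      rw [heq.1, (PySem.Set.contains_iff _ _).2 hmem] at hns
      simp at hns
  · rintro ⟨i, hi, happ, hns, rfl⟩
    obtain ⟨hfl, hsc⟩ := (pvApply_some_iff stamp s i m t).1 happ
    simp only [pvKeptA, pvMoves, List.mem_map, List.mem_filter, List.mem_range]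
    refine ⟨(i, t), ⟨⟨i, ⟨hi, hfl⟩, by rw [hsc]⟩, ?_⟩, rfl⟩
    simp only [Bool.not_eq_eq_eq_not, Bool.not_true]
    by_contra hcon
    exact hns ((PySem.Set.contains_iff _ _).1 (by
      revert hcon
      cases PySem.Set.contains seen t <;> simp))

-- ---------- the BFS-layer invariant ----------
def pvInvL (stamp target : List Char) (m n d : Nat)
    (f : List (List Char × List Nat)) (seen : PySem.Set (List Char)) : Prop :=
  (∀ sp ∈ f, sp.2.length = d ∧ pvOk (n + 1 - m) sp.2 ∧
      pvRun stamp m target sp.2 = some sp.1) ∧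
  (∀ sp ∈ f, ∀ e, e < d → ¬ pvReach stamp target m (n + 1 - m) sp.1 e) ∧
  (∀ s : List Char, s ∈ seen ↔ ∃ e, e ≤ d ∧ pvReach stamp target m (n + 1 - m) s e) ∧
  (∀ s p, p.length = d → pvOk (n + 1 - m) p → pvRun stamp m target p = some s →
      (∀ e, e < d → ¬ pvReach stamp target m (n + 1 - m) s e) → (s, p) ∈ f)

lemma pvInvL_base (stamp target : List Char) (m n : Nat) :
    pvInvL stamp target m n 0 [(target, [])] (PySem.Set.ofList [target]) := by
  refine ⟨?_, ?_, ?_, ?_⟩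
  · intro sp hsp
    rw [List.mem_singleton] at hsp
    subst hsp
    exact ⟨rfl, by intro i hi; simp at hi, rfl⟩
  · intro sp _ e he
    omega
  · intro s
    rw [PySem.Set.mem_ofList, List.mem_singleton]
    constructor
    · intro h
      subst h
      exact ⟨0, le_rfl, [], rfl, by intro i hi; simp at hi, rfl⟩
    · intro ⟨e, he, p, hl, _, hr⟩
      have : e = 0 := by omega
      subst this
      rw [List.length_eq_zero_iff] at hl
      subst hl
      rw [pvRun] at hr
      cases hr
      rfl
  · intro s p hl _ hr _
    rw [List.length_eq_zero_iff] at hl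
    subst hl
    rw [pvRun] at hr
    cases hr
    exact List.mem_singleton.2 rfl

lemma pvInvL_step (stamp target : List Char) (m n d : Nat)
    (f : List (List Char × List Nat)) (seen : PySem.Set (List Char))
    (h : pvInvL stamp target m n d f seen) :
    pvInvL stamp target m n (d+1) (f.flatMap (pvKeptA stamp m n seen))
      (PySem.Set.union seen (PySem.Set.ofList
        ((f.flatMap (pvKeptA stamp m n seen)).map (fun sp => sp.1)))) := by
  obtain ⟨h1, h2, h3, h4⟩ := h
  have hkept : ∀ t q, (t, q) ∈ f.flatMap (pvKeptA stamp m n seen) ↔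
      ∃ s p, (s, p) ∈ f ∧ ∃ i, i < n + 1 - m ∧ pvApply stamp s i m = some t ∧
        t ∉ seen ∧ q = p ++ [i] := by
    intro t q
    rw [List.mem_flatMap]
    constructor
    · intro ⟨sp, hsp, hmem⟩
      obtain ⟨s, p⟩ := sp
      exact ⟨s, p, hsp, (mem_pvKeptA stamp m n seen s t p q).1 hmem⟩
    · intro ⟨s, p, hsp, hrest⟩
      exact ⟨(s, p), hsp, (mem_pvKeptA stamp m n seen s t p q).2 hrest⟩
  have hvalid : ∀ sp ∈ f.flatMap (pvKeptA stamp m n seen),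
      sp.2.length = d + 1 ∧ pvOk (n + 1 - m) sp.2 ∧
        pvRun stamp m target sp.2 = some sp.1 := by
    intro ⟨t, q⟩ hmem
    obtain ⟨s, p, hsp, i, hi, happ, hns, rfl⟩ := (hkept t q).1 hmem
    obtain ⟨hl, hok, hr⟩ := h1 (s, p) hsp
    refine ⟨by simp [hl], ?_, ?_⟩
    · intro j hj
      rcases List.mem_append.1 hj with hj | hj
      · exact hok j hj
      · rw [List.mem_singleton] at hj; subst hj; exact hi
    · rw [pvRun_append, hr]
      show pvRun stamp m s [i] = some t
      rw [pvRun_single]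
      exact happ
  refine ⟨hvalid, ?_, ?_, ?_⟩
  · -- minimality of new layer members
    intro ⟨t, q⟩ hmem e he
    obtain ⟨s, p, hsp, i, hi, happ, hns, rfl⟩ := (hkept t q).1 hmem
    intro hre
    exact hns ((h3 t).2 ⟨e, by omega, hre⟩)
  · -- seen' characterizes distance ≤ d+1
    intro s
    rw [PySem.Set.mem_union, PySem.Set.mem_ofList]
    constructor
    · intro hmem
      rcases hmem with hmem | hmem
      · obtain ⟨e, he, hre⟩ := (h3 s).1 hmem
        exact ⟨e, by omega, hre⟩
      · obtain ⟨sp, hsp, rfl⟩ := List.mem_map.1 hmem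
        obtain ⟨hl, hok, hr⟩ := hvalid sp hsp
        exact ⟨d + 1, le_rfl, sp.2, hl, hok, hr⟩
    · intro ⟨e, he, hre⟩
      by_cases hseen : s ∈ seen
      · exact Or.inl hseen
      · right
        have hnotle : ¬ ∃ e', e' ≤ d ∧ pvReach stamp target m (n + 1 - m) s e' := by
          intro hcon
          exact hseen ((h3 s).2 hcon)
        have hed : e = d + 1 := by
          rcases Nat.lt_or_ge e (d + 1) with h | h
          · exact absurd ⟨e, by omega, hre⟩ hnotle
          · omega
        subst hed
        obtain ⟨P, hPl, hPok, hPr⟩ := hre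
        rcases P.eq_nil_or_concat with rfl | ⟨p0, i, rfl⟩
        · simp at hPl
        · rw [List.concat_eq_append] at hPl hPok hPr
          rw [pvRun_append] at hPr
          cases hr0 : pvRun stamp m target p0 with
          | none => rw [hr0] at hPr; cases hPr
          | some s0 =>
            rw [hr0] at hPr
            simp only [Option.bind_some] at hPr
            rw [pvRun_single] at hPr
            have hl0 : p0.length = d := by
              have := hPl; simp at this; omega
            have hok0 : pvOk (n + 1 - m) p0 :=
              fun j hj => hPok j (List.mem_append.2 (Or.inl hj))
            have hi0 : i < n + 1 - m := hPok i (List.mem_append.2 (Or.inr (List.mem_singleton.2 rfl)))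
            have hmin0 : ∀ e', e' < d → ¬ pvReach stamp target m (n + 1 - m) s0 e' := by
              intro e' he' ⟨p', hp'l, hp'ok, hp'r⟩
              apply hnotle
              refine ⟨e' + 1, by omega, p' ++ [i], by simp [hp'l], ?_, ?_⟩
              · intro j hj
                rcases List.mem_append.1 hj with hj | hj
                · exact hp'ok j hj
                · rw [List.mem_singleton] at hj; subst hj; exact hi0
              · rw [pvRun_append, hp'r]
                show pvRun stamp m s0 [i] = some s
                rw [pvRun_single]; exact hPr
            have hmem0 : (s0, p0) ∈ f := h4 s0 p0 hl0 hok0 hr0 hmin0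
            refine List.mem_map.2 ⟨(s, p0 ++ [i]), ?_, rfl⟩
            exact (hkept s (p0 ++ [i])).2 ⟨s0, p0, hmem0, i, hi0, hPr, hseen, rfl⟩
  · -- completeness of the new layer
    intro s P hPl hPok hPr hmin
    rcases P.eq_nil_or_concat with rfl | ⟨p0, i, rfl⟩
    · simp at hPl
    · rw [List.concat_eq_append] at hPl hPok hPr
      rw [pvRun_append] at hPr
      cases hr0 : pvRun stamp m target p0 with
      | none => rw [hr0] at hPr; cases hPr
      | some s0 =>
        rw [hr0] at hPr
        simp only [Option.bind_some] at hPr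
        rw [pvRun_single] at hPr
        have hl0 : p0.length = d := by
          have := hPl; simp at this; omega
        have hok0 : pvOk (n + 1 - m) p0 :=
          fun j hj => hPok j (List.mem_append.2 (Or.inl hj))
        have hi0 : i < n + 1 - m := hPok i (List.mem_append.2 (Or.inr (List.mem_singleton.2 rfl)))
        have hmin0 : ∀ e', e' < d → ¬ pvReach stamp target m (n + 1 - m) s0 e' := by
          intro e' he' ⟨p', hp'l, hp'ok, hp'r⟩
          apply hmin (e' + 1) (by omega)
          refine ⟨p' ++ [i], by simp [hp'l], ?_, ?_⟩
          · intro j hj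
            rcases List.mem_append.1 hj with hj | hj
            · exact hp'ok j hj
            · rw [List.mem_singleton] at hj; subst hj; exact hi0
          · rw [pvRun_append, hp'r]
            show pvRun stamp m s0 [i] = some s
            rw [pvRun_single]; exact hPr
        have hmem0 : (s0, p0) ∈ f := h4 s0 p0 hl0 hok0 hr0 hmin0
        have hns : s ∉ seen := by
          intro hmem
          obtain ⟨e, he, hre⟩ := (h3 s).1 hmem
          exact hmin e (by omega) hre
        rw [List.concat_eq_append]
        exact (hkept s (p0 ++ [i])).2 ⟨s0, p0, hmem0, i, hi0, hPr, hns, rfl⟩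

-- ---------- assembling the two sides ----------
lemma pvSortedCongr (l1 l2 : List String) (h : ∀ x, x ∈ l1 ↔ x ∈ l2) :
    PySem.List.sorted (PySem.Set.ofList l1) (fun x => x) false
      = PySem.List.sorted (PySem.Set.ofList l2) (fun x => x) false :=
  PySem.List.sorted_eq_sorted_of_perm _ _ _ (fun _ _ hab => hab)
    ((List.perm_ext_iff_of_nodup (PySem.Set.nodup_ofList _) (PySem.Set.nodup_ofList _)).2
      (fun a => by rw [PySem.Set.mem_ofList, PySem.Set.mem_ofList]; exact h a))

lemma pvIterGo_fail (stamp target goal : List Char) (m n : Nat) :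
    ∀ ds : List Nat, (∀ d ∈ ds, (pvDfs stamp goal m n d target).1 = []) →
      pvIterGo stamp target goal m n ds = ["FAILED"] := by
  intro ds
  induction ds with
  | nil => intro _; rfl
  | cons d ds ih =>
    intro h
    rw [pvIterGo]
    simp only [h d List.mem_cons_self]
    rw [if_neg (by simp)]
    by_cases hal : (pvDfs stamp goal m n d target).2 = false
    · rw [if_pos hal]
    · rw [if_neg hal]
      exact ih (fun e he => h e (List.mem_cons_of_mem _ he))

lemma pvLevels_fail (stamp target : List Char) (m n : Nat)
    (hg : ∀ e, ¬ pvReach stamp target m (n + 1 - m) (List.replicate n '?') e) :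
    ∀ (M : Nat) (f : List (List Char × List Nat)) (seen : PySem.Set (List Char))
      (hq : ∀ sp ∈ f, sp.1.length = n),
      pvMu n f ≤ M →
      (∀ sp ∈ f, pvOk (n + 1 - m) sp.2 ∧ pvRun stamp m target sp.2 = some sp.1) →
      pvLevels stamp m n (List.replicate n '?') f seen hq = ["FAILED"] := by
  intro M
  induction M with
  | zero =>
    intro f seen hq hM _
    have hnil : f = [] := by
      cases f with
      | nil => rfl
      | cons e f =>
        exfalso
        rw [pvMu_cons] at hM
        have : 0 < (n+2) ^ pvCnt e.1 := Nat.pow_pos (by omega)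
        omega
    subst hnil
    exact pvLevels_nil stamp m n _ seen hq
  | succ M ih =>
    intro f seen hq hM hvalid
    cases f with
    | nil => exact pvLevels_nil stamp m n _ seen hq
    | cons hd tl =>
      rw [pvLevels]
      rw [dif_neg (by simp : ¬(hd :: tl = []))]
      have hfilter : (hd :: tl).filter (fun sp => sp.1 == List.replicate n '?') = [] := by
        rw [List.filter_eq_nil_iff]
        intro sp hsp hbeq
        rw [beq_iff_eq] at hbeq
        obtain ⟨hok, hr⟩ := hvalid sp hsp
        exact hg sp.2.length ⟨sp.2, rfl, hok, by rw [hr, hbeq]⟩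
      simp only [hfilter, List.map_nil]
      rw [if_neg (show ¬(([] : List String) ≠ []) by simp)]
      apply ih
      · have := pvMuB_lt n (pvKeptA stamp m n seen) (hd :: tl) (by simp)
          (fun sp hsp => pvKeptA_mu stamp m n seen sp (hq sp hsp))
        omega
      · intro ⟨t, q⟩ hmem
        obtain ⟨sp, hsp, hk⟩ := List.mem_flatMap.1 hmem
        obtain ⟨s, p⟩ := sp
        obtain ⟨i, hi, happ, _, rfl⟩ := (mem_pvKeptA stamp m n seen s t p q).1 hk
        obtain ⟨hok, hr⟩ := hvalid (s, p) hsp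
        refine ⟨?_, ?_⟩
        · intro j hj
          rcases List.mem_append.1 hj with hj | hj
          · exact hok j hj
          · rw [List.mem_singleton] at hj; subst hj; exact hi
        · rw [pvRun_append, hr]
          show pvRun stamp m s [i] = some t
          rw [pvRun_single]; exact happ

lemma pvMainReach (stamp target : List Char) (m n : Nat) (htn : target.length = n) (D : Nat)
    (hDreach : pvReach stamp target m (n + 1 - m) (List.replicate n '?') D)
    (hDmin : ∀ e, e < D → ¬ pvReach stamp target m (n + 1 - m) (List.replicate n '?') e) :
    ∀ (k d : Nat) (f : List (List Char × List Nat)) (seen : PySem.Set (List Char))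
      (hq : ∀ sp ∈ f, sp.1.length = n),
      d + k = D →
      pvInvL stamp target m n d f seen →
      pvLevels stamp m n (List.replicate n '?') f seen hq
        = pvIterGo stamp target (List.replicate n '?') m n
            (List.range' d (pvCnt target + 1 - d)) := by
  have hDbound : D ≤ pvCnt target := by
    obtain ⟨p, hl, hok, hr⟩ := hDreach
    have := pvRun_facts stamp m n p target (List.replicate n '?') htn hok hr
    rw [pvCnt_replicate] at this
    omega
  intro k
  induction k with
  | zero =>
    intro d f seen hq hdk hInv
    have hdD : d = D := by omega
    subst hdD
    obtain ⟨i1, i2, i3, i4⟩ := hInv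
    obtain ⟨P, hPl, hPok, hPr⟩ := hDreach
    -- the goal entry is in the frontier
    have hgmem : (List.replicate n '?', P) ∈ f := i4 _ P hPl hPok hPr hDmin
    -- B's DFS at depth d is nonempty
    have hPdfs : P ∈ (pvDfs stamp (List.replicate n '?') m n d target).1 :=
      (pvDfs_mem stamp (List.replicate n '?') m n d target P).2 ⟨hPl, hPok, hPr⟩
    have hdfsne : (pvDfs stamp (List.replicate n '?') m n d target).1 ≠ [] :=
      List.ne_nil_of_mem hPdfs
    -- unfold B
    rw [show pvCnt target + 1 - d = (pvCnt target - d) + 1 from by omega]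
    rw [show List.range' d ((pvCnt target - d) + 1)
        = d :: List.range' (d + 1) (pvCnt target - d) from rfl]
    rw [pvIterGo]
    rw [if_pos hdfsne]
    -- unfold A's level form
    rw [pvLevels]
    rw [dif_neg (List.ne_nil_of_mem hgmem)]
    have hhitsne : ((f.filter (fun sp => sp.1 == List.replicate n '?')).map
        (fun sp => pvRender sp.2.reverse)) ≠ [] := by
      intro hcon
      rw [List.map_eq_nil_iff, List.filter_eq_nil_iff] at hcon
      exact hcon _ hgmem (by simp)
    rw [if_pos hhitsne]
    -- the two hit lists have the same members
    apply pvSortedCongr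
    intro x
    constructor
    · intro hx
      obtain ⟨sp, hsp, rfl⟩ := List.mem_map.1 hx
      obtain ⟨hspf, hbeq⟩ := List.mem_filter.1 hsp
      rw [beq_iff_eq] at hbeq
      obtain ⟨hl, hok, hr⟩ := i1 sp hspf
      refine List.mem_map.2 ⟨sp.2, ?_, rfl⟩
      exact (pvDfs_mem stamp (List.replicate n '?') m n d target sp.2).2
        ⟨hl, hok, by rw [hr, hbeq]⟩
    · intro hx
      obtain ⟨seq, hseq, rfl⟩ := List.mem_map.1 hx
      obtain ⟨hl, hok, hr⟩ :=
        (pvDfs_mem stamp (List.replicate n '?') m n d target seq).1 hseq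
      refine List.mem_map.2 ⟨(List.replicate n '?', seq), ?_, rfl⟩
      exact List.mem_filter.2 ⟨i4 _ seq hl hok hr hDmin, by simp⟩
  | succ k ih =>
    intro d f seen hq hdk hInv
    have hdD : d < D := by omega
    obtain ⟨i1, i2, i3, i4⟩ := hInv
    -- B's DFS at depth d is empty
    have hdfs : (pvDfs stamp (List.replicate n '?') m n d target).1 = [] := by
      rw [List.eq_nil_iff_forall_not_mem]
      intro seq hseq
      obtain ⟨hl, hok, hr⟩ :=
        (pvDfs_mem stamp (List.replicate n '?') m n d target seq).1 hseq
      exact hDmin d hdD ⟨seq, hl, hok, hr⟩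
    -- the frontier is nonempty: the d-prefix of the shortest goal path lies in it
    obtain ⟨P, hPl, hPok, hPr⟩ := hDreach
    have hdle : d ≤ D := by omega
    have htk : (P.take d).length = d := by
      rw [List.length_take]
      omega
    have hrun0 : ∃ s0, pvRun stamp m target (P.take d) = some s0 ∧
        pvRun stamp m s0 (P.drop d) = some (List.replicate n '?') := by
      have := pvRun_append stamp m (P.take d) (P.drop d) target
      rw [List.take_append_drop] at this
      rw [this] at hPr
      cases hr0 : pvRun stamp m target (P.take d) with
      | none => rw [hr0] at hPr; cases hPr
      | some s0 =>
        rw [hr0] at hPr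
        exact ⟨s0, rfl, hPr⟩
    obtain ⟨s0, hr0, hr1⟩ := hrun0
    have hok0 : pvOk (n + 1 - m) (P.take d) :=
      fun j hj => hPok j (List.mem_of_mem_take hj)
    have hmin0 : ∀ e, e < d → ¬ pvReach stamp target m (n + 1 - m) s0 e := by
      intro e he ⟨p', hp'l, hp'ok, hp'r⟩
      apply hDmin (e + (D - d)) (by omega)
      refine ⟨p' ++ P.drop d, ?_, ?_, ?_⟩
      · rw [List.length_append, List.length_drop, hp'l, hPl]
      · intro j hj
        rcases List.mem_append.1 hj with hj | hj
        · exact hp'ok j hj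
        · exact hPok j (List.mem_of_mem_drop hj)
      · rw [pvRun_append, hp'r]
        exact hr1
    have hmem0 : (s0, P.take d) ∈ f := i4 s0 (P.take d) htk hok0 hr0 hmin0
    -- the frontier is goal-free
    have hfilter : f.filter (fun sp => sp.1 == List.replicate n '?') = [] := by
      rw [List.filter_eq_nil_iff]
      intro sp hsp hbeq
      rw [beq_iff_eq] at hbeq
      obtain ⟨hl, hok, hr⟩ := i1 sp hsp
      exact hDmin d hdD ⟨sp.2, hl, hok, by rw [hr, hbeq]⟩
    -- unfold B
    rw [show pvCnt target + 1 - d = (pvCnt target - d) + 1 from by omega]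
    rw [show List.range' d ((pvCnt target - d) + 1)
        = d :: List.range' (d + 1) (pvCnt target - d) from rfl]
    have halive : (pvDfs stamp (List.replicate n '?') m n d target).2 = true := by
      rw [pvDfs_alive]
      exact ⟨P.take d, htk, hok0, by rw [hr0]; rfl⟩
    rw [pvIterGo]
    simp only [hdfs]
    rw [if_neg (by simp)]
    rw [if_neg (by rw [halive]; simp)]
    -- unfold A's level form
    rw [pvLevels]
    rw [dif_neg (List.ne_nil_of_mem hmem0)]
    simp only [hfilter, List.map_nil]
    rw [if_neg (show ¬(([] : List String) ≠ []) by simp)]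
    rw [show pvCnt target - d = pvCnt target + 1 - (d + 1) from by omega]
    exact ih (d + 1) (f.flatMap (pvKeptA stamp m n seen)) _ _ (by omega)
      (pvInvL_step stamp target m n d f seen ⟨i1, i2, i3, i4⟩)

lemma pvExistsMin (P : Nat → Prop) (h : ∃ e, P e) :
    ∃ D, P D ∧ ∀ e, e < D → ¬ P e := by
  obtain ⟨e0, he0⟩ := h
  induction e0 using Nat.strong_induction_on with
  | _ e0 ih =>
    by_cases h2 : ∃ e, e < e0 ∧ P e
    · obtain ⟨e, he1, he2⟩ := h2
      exact ih e he1 he2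
    · exact ⟨e0, he0, fun e he hPe => h2 ⟨e, he, hPe⟩⟩

-- ===== VERDICT (by name: the statement is the Claim_ definition above) =====
theorem get_all_solutions_spec : Claim_equal_get_all_solutions := by
  intro stamp target _
  show get_all_solutions stamp target = get_all_solutions_alt stamp target
  have hof : PySem.Dict.ofList [(target.toList, (0 : Nat))]
      = PySem.Dict.mk [(target.toList, 0)] := rfl
  have hInvMid : pvInvMid (PySem.Dict.ofList [(target.toList, (0 : Nat))])
      (PySem.Set.ofList [target.toList]) [] 1 := by
    refine ⟨by simp, ?_, ?_⟩
    · intro t ht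
      rw [PySem.Set.mem_ofList, List.mem_singleton] at ht
      subst ht
      refine ⟨0, ?_, by omega⟩
      rw [hof, PySem.Dict.get?_mk_cons]
      simp
    · intro t hc
      rw [hof, PySem.Dict.contains_eq_isSome_get?, PySem.Dict.get?_mk_cons] at hc
      by_cases he : target.toList = t
      · left
        rw [PySem.Set.mem_ofList, List.mem_singleton]
        exact he.symm
      · exfalso
        rw [if_neg (by simp [he])] at hc
        have hnone : (PySem.Dict.mk ([] : List (List Char × Nat))).get? t = none := rfl
        rw [hnone] at hc
        simp at hc
  have hq0 : ∀ sp ∈ [(target.toList, ([] : List Nat))], sp.1.length = target.toList.length := by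
    intro sp h
    rw [List.mem_singleton] at h
    subst h
    rfl
  have hA : get_all_solutions stamp target
      = pvLevels stamp.toList stamp.toList.length target.toList.length
          (List.replicate target.toList.length '?')
          [(target.toList, [])] (PySem.Set.ofList [target.toList]) hq0 :=
    pvSimA stamp.toList stamp.toList.length target.toList.length
      (pvMu target.toList.length [(target.toList, [])]) 0
      [(target.toList, [])] (PySem.Dict.ofList [(target.toList, 0)])
      (PySem.Set.ofList [target.toList]) le_rfl
      (by intro sp h; rw [List.mem_singleton] at h; subst h; rfl)
      hInvMid hq0
  have hB : get_all_solutions_alt stamp target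
      = pvIterGo stamp.toList target.toList (List.replicate target.toList.length '?')
          stamp.toList.length target.toList.length
          (List.range' 0 (pvCnt target.toList + 1)) := by
    show pvIterGo stamp.toList target.toList (List.replicate target.toList.length '?')
        stamp.toList.length target.toList.length
        (List.range (pvCnt target.toList + 1)) = _
    rw [List.range_eq_range']
  rw [hA, hB]
  by_cases hreach : ∃ e, pvReach stamp.toList target.toList stamp.toList.length
      (target.toList.length + 1 - stamp.toList.length)
      (List.replicate target.toList.length '?') e
  · obtain ⟨D, hD, hDmin⟩ := pvExistsMin _ hreach
    have := pvMainReach stamp.toList target.toList stamp.toList.length target.toList.length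
      rfl D hD hDmin D 0 [(target.toList, [])] (PySem.Set.ofList [target.toList]) hq0
      (by omega) (pvInvL_base stamp.toList target.toList stamp.toList.length target.toList.length)
    rw [this, Nat.sub_zero]
  · have hg : ∀ e, ¬ pvReach stamp.toList target.toList stamp.toList.length
        (target.toList.length + 1 - stamp.toList.length)
        (List.replicate target.toList.length '?') e :=
      fun e he => hreach ⟨e, he⟩
    rw [pvLevels_fail stamp.toList target.toList stamp.toList.length target.toList.length hg
      (pvMu target.toList.length [(target.toList, [])]) [(target.toList, [])]
      (PySem.Set.ofList [target.toList]) hq0 le_rfl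
      (by
        intro sp h
        rw [List.mem_singleton] at h
        subst h
        exact ⟨by intro i hi; simp at hi, rfl⟩)]
    rw [pvIterGo_fail stamp.toList target.toList (List.replicate target.toList.length '?')
      stamp.toList.length target.toList.length _
      (by
        intro d _
        rw [List.eq_nil_iff_forall_not_mem]
        intro seq hseq
        obtain ⟨hl, hok, hr⟩ := (pvDfs_mem stamp.toList (List.replicate target.toList.length '?')
          stamp.toList.length target.toList.length d target.toList seq).1 hseq
        exact hg d ⟨seq, hl, hok, hr⟩)]
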